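-- pv_equiv track=rewrite | github.com/JaraVictoria/SSL | Lexer/automataMas.py | automata_mas
-- ===== SOURCE A (Python) =====
-- ESTADO_FINAL = "ESTADO ACEPTADO"
--
-- ESTADO_NO_FINAL = "ESTADO NO ACEPTADO"
--
-- ESTADO_TRAMPA = "ESTADO TRAMPA"
--
-- def automata_mas(cadena):
-- 	estado = 0
-- 	estados_finales = [1]
--
-- 	for caracter in cadena:
-- 		if estado == 0 and caracter == "+":
-- 			estado = 1
-- 		else:
-- 			estado = -1
-- 			break
--
-- 	if estado == -1:
-- 		return ESTADO_TRAMPA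
-- 	if estado in estados_finales:
-- 		return ESTADO_FINAL
-- 	else:
-- 		return ESTADO_NO_FINAL
-- ===== SOURCE B (Python) =====
-- ESTADO_FINAL = "ESTADO ACEPTADO"
-- ESTADO_NO_FINAL = "ESTADO NO ACEPTADO"
-- ESTADO_TRAMPA = "ESTADO TRAMPA"
--
-- def automata_mas(cadena):
--     chars = list(cadena)
--     if not chars:
--         return ESTADO_NO_FINAL
--     if chars == ["+"]:
--         return ESTADO_FINAL
--     return ESTADO_TRAMPA
-- ===== Notes on version B (the rewrite author's own statement) =====
-- stated objective: simpler
-- what changed: Replaced the simulated state-machine loop with a direct structural test on the list of characters (empty / exactly ['+'] / anything else).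
import Mathlib
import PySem

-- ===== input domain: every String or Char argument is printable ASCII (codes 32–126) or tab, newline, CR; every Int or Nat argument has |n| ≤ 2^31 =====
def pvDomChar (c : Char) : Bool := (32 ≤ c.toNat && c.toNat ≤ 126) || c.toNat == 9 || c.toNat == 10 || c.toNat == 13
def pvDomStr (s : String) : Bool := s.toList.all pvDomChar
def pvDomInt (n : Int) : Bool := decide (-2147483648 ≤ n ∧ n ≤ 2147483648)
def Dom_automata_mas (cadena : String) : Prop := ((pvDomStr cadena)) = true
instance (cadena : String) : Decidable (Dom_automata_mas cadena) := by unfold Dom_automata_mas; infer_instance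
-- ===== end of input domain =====

-- B replaces A's simulated state-machine loop with a direct structural test on the character list (simpler).

-- ===== PORT A =====
-- A's for-loop with break: recursion over the characters carrying 'estado'; break = returning -1 at once.
def automataMasLoop : Int → List Char → Int
  | estado, [] => estado
  | estado, c :: rest =>
      if estado = 0 ∧ c = '+' then automataMasLoop 1 rest
      else -1

def automata_mas (cadena : String) : String :=
  let estado := automataMasLoop 0 cadena.toList
  let estados_finales : List Int := [1]
  if estado = -1 then "ESTADO TRAMPA"
  else if estado ∈ estados_finales then "ESTADO ACEPTADO"
  else "ESTADO NO ACEPTADO"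

-- ===== PORT B =====
def automata_mas_alt (cadena : String) : String :=
  match cadena.toList with
  | [] => "ESTADO NO ACEPTADO"
  | chars => if chars = ['+'] then "ESTADO ACEPTADO" else "ESTADO TRAMPA"

-- ===== PRECONDITION & SPEC =====
def Spec_automata_mas (cadena : String) (out : String) : Prop := out = automata_mas_alt cadena
instance (cadena : String) (out : String) : Decidable (Spec_automata_mas cadena out) := by unfold Spec_automata_mas; infer_instance

-- ===== CLAIM (what is proved, stated in full; the proofs are below) =====
def Claim_equal_automata_mas : Prop := ∀ (cadena : String), Dom_automata_mas cadena → Spec_automata_mas cadena (automata_mas cadena)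

-- ===== LEMMAS AND PROOFS =====
theorem automata_mas_eq (cadena : String) : automata_mas cadena = automata_mas_alt cadena := by
  unfold automata_mas automata_mas_alt
  match h : cadena.toList with
  | [] => simp [automataMasLoop]
  | [c] =>
      by_cases hc : c = '+' <;> simp [automataMasLoop, hc]
  | c :: d :: rest =>
      by_cases hc : c = '+'
      · simp [automataMasLoop, hc]
      · simp [automataMasLoop, hc]

-- ===== VERDICT (by name: the statement is the Claim_ definition above) =====
theorem automata_mas_spec : Claim_equal_automata_mas := by
  intro cadena _
  exact automata_mas_eq cadena
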